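-- pv_equiv track=rewrite | github.com/LufsX/Profiles | Tools/build_clash.py | is_domainset
-- ===== SOURCE A (Python) =====
-- def is_domainset(content):
--     lines = content.strip().split("\n")
--     non_comment_lines = [line for line in lines if line and not line.startswith("#")]
--
--     if not non_comment_lines:
--         return False
--
--     if any("," in line for line in non_comment_lines):
--         return False
--     return True
-- ===== SOURCE B (Python) =====
-- def is_domainset(content):
--     # character-level state machine: no line list is ever built
--     seen = False
--     at_start = True
--     comment = False
--     for ch in content.strip():
--         if ch == "\n":
--             at_start = True
--             comment = False
--             continue
--         if at_start:
--             comment = ch == "#"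
--             at_start = False
--             if not comment:
--                 seen = True
--         if not comment and ch == ",":
--             return False
--     return seen
-- ===== Notes on version B (the rewrite author's own statement) =====
-- stated objective: alternative
-- what changed: Replaced A's split-into-lines plus filtered-list plus two scans (emptiness check and any() comma scan) with a character-level state machine over the stripped string that never builds a line list: flags track start-of-line, inside-comment and seen-valid-line, returning False immediately on a comma outside a comment line.
import Mathlib
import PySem

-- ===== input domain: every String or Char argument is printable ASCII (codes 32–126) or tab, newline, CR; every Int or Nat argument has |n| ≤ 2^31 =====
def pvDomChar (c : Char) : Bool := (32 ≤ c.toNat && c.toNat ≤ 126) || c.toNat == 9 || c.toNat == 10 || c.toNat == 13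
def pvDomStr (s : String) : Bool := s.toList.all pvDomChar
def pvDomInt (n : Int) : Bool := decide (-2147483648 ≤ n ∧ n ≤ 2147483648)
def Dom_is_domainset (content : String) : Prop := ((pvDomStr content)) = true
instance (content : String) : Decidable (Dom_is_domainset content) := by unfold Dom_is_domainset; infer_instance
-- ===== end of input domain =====

-- B replaces A's split-into-lines, filtered-list construction and two scans with a
-- character-level state machine over the stripped string that never builds a line list (alternative decomposition).

-- content.strip().split("\n"): "\n" is non-empty so Python's split always returns; .getD [] only discharges split?'s empty-separator option
def pvSplitLines (content : String) : List String :=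
  (PySem.Str.split? (PySem.Str.strip content) "\n").getD []

-- ===== PORT A =====
def is_domainset (content : String) : Bool :=
  let lines := pvSplitLines content
  let nonCommentLines := lines.filter (fun line => decide (line ≠ "") && !PySem.Str.startswith line "#")
  if nonCommentLines.isEmpty then false
  else if nonCommentLines.any (fun line => PySem.Str.isIn "," line) then false
  else true

-- ===== PORT B =====
-- state machine: seen = a non-comment line was encountered, atStart = at start of a line,
-- comment = currently inside a line that started with '#'
def bGo : List Char → Bool → Bool → Bool → Bool
  | [], seen, _atStart, _comment => seen
  | c :: rest, seen, atStart, comment =>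
    if c = '\n' then bGo rest seen true false
    else
      let comment := if atStart then decide (c = '#') else comment
      let seen := if atStart && !comment then true else seen
      if !comment && decide (c = ',') then false
      else bGo rest seen false comment

def is_domainset_alt (content : String) : Bool :=
  bGo (PySem.Str.strip content).toList false true false

-- ===== PRECONDITION & SPEC =====
def Spec_is_domainset (content : String) (out : Bool) : Prop := out = is_domainset_alt content
instance (content : String) (out : Bool) : Decidable (Spec_is_domainset content out) := by unfold Spec_is_domainset; infer_instance

-- ===== CLAIM (what is proved, stated in full; the proofs are below) =====
def Claim_equal_is_domainset : Prop := ∀ (content : String), Dom_is_domainset content → Spec_is_domainset content (is_domainset content)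

-- ===== LEMMAS AND PROOFS =====

-- the lines of a char list: (first line, remaining lines), splitting at '\n'
def splitNl : List Char → List Char × List (List Char)
  | [] => ([], [])
  | c :: rest =>
    if c = '\n' then ([], (splitNl rest).1 :: (splitNl rest).2)
    else (c :: (splitNl rest).1, (splitNl rest).2)

-- line-based reference loop (proof-side only)
def linesResC : List (List Char) → Bool → Bool
  | [], seen => seen
  | line :: rest, seen =>
    if line.isEmpty || PySem.Chars.startswith line ['#'] then linesResC rest seen
    else if PySem.Chars.isIn [','] line then false
    else linesResC rest true

theorem isIn_single (a : Char) (x : List Char) :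
    PySem.Chars.isIn [a] x = decide (a ∈ x) := by
  by_cases hm : a ∈ x
  · simp [hm, PySem.Chars.isIn_iff_infix, List.singleton_infix_iff]
  · simp [hm, PySem.Chars.isIn_eq_false_iff, List.singleton_infix_iff]

theorem startswith_single_cons (a c : Char) (x : List Char) :
    PySem.Chars.startswith (c :: x) [a] = decide (c = a) := by
  by_cases h : c = a
  · subst h; simp [PySem.Chars.startswith, List.isPrefixOf]
  · have hb : (a == c) = false := beq_eq_false_iff_ne.mpr (Ne.symm h)
    simp [PySem.Chars.startswith, List.isPrefixOf, h, hb]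

theorem splitOn_go_eq (fuel : Nat) (l cur : List Char) (acc : List (List Char))
    (h : l.length < fuel) :
    PySem.Chars.splitOn.go ['\n'] fuel l cur acc
      = acc.reverse ++ (cur.reverse ++ (splitNl l).1) :: (splitNl l).2 := by
  induction fuel generalizing l cur acc with
  | zero => omega
  | succ fuel ih =>
    cases l with
    | nil => simp [PySem.Chars.splitOn.go, splitNl]
    | cons c rest =>
      by_cases hc : c = '\n'
      · subst hc
        have hstep : PySem.Chars.splitOn.go ['\n'] (fuel + 1) ('\n' :: rest) cur acc
            = PySem.Chars.splitOn.go ['\n'] fuel rest [] (cur.reverse :: acc) := by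
          simp [PySem.Chars.splitOn.go, List.isPrefixOf]
        rw [hstep, ih rest [] _ (by simp at h; omega)]
        simp [splitNl]
      · have hb : ('\n' == c) = false := beq_eq_false_iff_ne.mpr (Ne.symm hc)
        have hstep : PySem.Chars.splitOn.go ['\n'] (fuel + 1) (c :: rest) cur acc
            = PySem.Chars.splitOn.go ['\n'] fuel rest (c :: cur) acc := by
          simp [PySem.Chars.splitOn.go, List.isPrefixOf, hb]
        rw [hstep, ih rest (c :: cur) acc (by simp at h; omega)]
        simp [splitNl, hc]

theorem splitOn_eq_splitNl (cs : List Char) :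
    PySem.Chars.splitOn cs ['\n'] = (splitNl cs).1 :: (splitNl cs).2 := by
  unfold PySem.Chars.splitOn
  rw [splitOn_go_eq _ _ _ _ (by omega)]
  simp

-- the state machine computes the line-based loop
theorem bGo_eq_linesResC (l : List Char) : ∀ seen : Bool,
    (bGo l seen true false = linesResC ((splitNl l).1 :: (splitNl l).2) seen)
    ∧ (bGo l seen false true = linesResC (splitNl l).2 seen)
    ∧ (bGo l seen false false =
        if PySem.Chars.isIn [','] (splitNl l).1 then false
        else linesResC (splitNl l).2 seen) := by
  induction l with
  | nil =>
    intro seen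
    simp [bGo, splitNl, linesResC, isIn_single]
  | cons c rest ih =>
    intro seen
    by_cases hc : c = '\n'
    · subst hc
      refine ⟨?_, ?_, ?_⟩ <;>
        simp [bGo, splitNl, linesResC, (ih seen).1, isIn_single]
    · have hsw := startswith_single_cons '#' c (splitNl rest).1
      by_cases ch : c = '#'
      · subst ch
        refine ⟨?_, ?_, ?_⟩
        · simp [bGo, splitNl, linesResC, hsw, (ih seen).2.1]
        · simp [bGo, splitNl, (ih seen).2.1]
        · simp [bGo, splitNl, isIn_single, (ih seen).2.2]
      · by_cases hcm : c = ','
        · subst hcm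
          refine ⟨?_, ?_, ?_⟩
          · simp [bGo, splitNl, linesResC, hsw, isIn_single]
          · simp [bGo, splitNl, (ih seen).2.1]
          · simp [bGo, splitNl, isIn_single]
        · have hb : (',' = c) = False := by simp [Ne.symm hcm]
          refine ⟨?_, ?_, ?_⟩
          · simp [bGo, splitNl, hc, ch, hcm, linesResC, hsw, isIn_single, (ih true).2.2, hb]
          · simp [bGo, splitNl, hc, hcm, (ih seen).2.1]
          · simp [bGo, splitNl, hc, hcm, isIn_single, (ih seen).2.2, hb]

-- the line-based loop in terms of A's filtered list
theorem linesResC_closed (lines : List (List Char)) (seen : Bool) :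
    linesResC lines seen =
      (if (lines.filter (fun x => !x.isEmpty && !PySem.Chars.startswith x ['#'])).any
            (fun x => PySem.Chars.isIn [','] x) then false
       else seen || !(lines.filter (fun x => !x.isEmpty && !PySem.Chars.startswith x ['#'])).isEmpty) := by
  induction lines generalizing seen with
  | nil => simp [linesResC]
  | cons line rest ih =>
    by_cases he : line.isEmpty
    · simp [linesResC, he, ih]
    · cases hs : PySem.Chars.startswith line ['#'] with
      | true => simp [linesResC, he, hs, ih]
      | false =>
        cases hc : PySem.Chars.isIn [','] line with
        | true => simp [linesResC, he, hs, hc]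
        | false => simp [linesResC, he, hs, hc, ih]

theorem branch_eq {α : Type} (q : α → Bool) (nc : List α) :
    (if nc.isEmpty then false else if nc.any q then false else true)
      = (if nc.any q then false else (false || !nc.isEmpty)) := by
  cases nc with
  | nil => simp
  | cons a t => cases hq : (a :: t).any q <;> simp_all

theorem pvSplitLines_map (content : String) :
    (pvSplitLines content).map String.toList
      = (splitNl (PySem.Str.strip content).toList).1
        :: (splitNl (PySem.Str.strip content).toList).2 := by
  have h := PySem.Str.split?_map (PySem.Str.strip content) "\n"
  unfold pvSplitLines
  cases hs : PySem.Str.split? (PySem.Str.strip content) "\n" with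
  | none => rw [hs] at h; simp [PySem.Chars.split?] at h
  | some ls =>
    rw [hs] at h
    rw [show "\n".toList = ['\n'] from rfl] at h
    simp only [Option.map_some, PySem.Chars.split?, List.isEmpty_cons,
      Bool.false_eq_true, if_false, Option.some.injEq] at h
    simp only [Option.getD_some]
    rw [h, splitOn_eq_splitNl]

theorem ne_empty_eq (line : String) : decide (line ≠ "") = !line.toList.isEmpty := by
  by_cases h : line = ""
  · subst h; rfl
  · have hne : line.toList ≠ [] := fun hn => h (String.toList_eq_nil_iff.mp hn)
    simp [h, hne]

-- ===== VERDICT (by name: the statement is the Claim_ definition above) =====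
theorem is_domainset_spec : Claim_equal_is_domainset := by
  intro content _
  unfold Spec_is_domainset is_domainset_alt
  rw [(bGo_eq_linesResC (PySem.Str.strip content).toList false).1, linesResC_closed,
    ← pvSplitLines_map]
  rw [List.filter_map, List.any_map, List.isEmpty_map]
  simp only [is_domainset, Function.comp_def]
  rw [branch_eq]
  have hf : (fun line : String => decide (line ≠ "") && !PySem.Str.startswith line "#")
      = (fun line : String => !line.toList.isEmpty && !PySem.Chars.startswith line.toList ['#']) := by
    funext line
    rw [ne_empty_eq]
    simp
  have hg : (fun line : String => PySem.Str.isIn "," line)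
      = (fun line : String => PySem.Chars.isIn [','] line.toList) := by
    funext line; simp
  rw [hf, hg]
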